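-- pv_equiv track=rewrite | github.com/uktrade/lite-api | api/external_data/management/commands/ingest_sanctions.py | _get_primary_names_dict
-- ===== SOURCE A (Python) =====
-- def _get_primary_names_dict(names):
--     backup_name = None
--     for name in names:
--         nametype = name.get("nametype")
--         if not nametype:
--             continue
--         if nametype.lower() == "primary name":
--             return name
--         if nametype.lower() == "primary name variation":
--             backup_name = name
--     if backup_name:
--         return backup_name
--
--     raise Exception("Primary name not found")
-- ===== SOURCE B (Python) =====
-- def _get_primary_names_dict(names):
--     names = list(names)
--     primary = next((n for n in names if (n.get("nametype") or "").lower() == "primary name"), None)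
--     if primary is not None:
--         return primary
--     variation = next((n for n in reversed(names) if (n.get("nametype") or "").lower() == "primary name variation"), None)
--     if variation is not None:
--         return variation
--     raise Exception("Primary name not found")
-- ===== Notes on version B (the rewrite author's own statement) =====
-- stated objective: idiomatic
-- what changed: Replaces the fused early-return loop with accumulator by two independent position-selecting passes: next() over the list for the first 'primary name', else next() over reversed(names) for the last 'primary name variation'.
import Mathlib
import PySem

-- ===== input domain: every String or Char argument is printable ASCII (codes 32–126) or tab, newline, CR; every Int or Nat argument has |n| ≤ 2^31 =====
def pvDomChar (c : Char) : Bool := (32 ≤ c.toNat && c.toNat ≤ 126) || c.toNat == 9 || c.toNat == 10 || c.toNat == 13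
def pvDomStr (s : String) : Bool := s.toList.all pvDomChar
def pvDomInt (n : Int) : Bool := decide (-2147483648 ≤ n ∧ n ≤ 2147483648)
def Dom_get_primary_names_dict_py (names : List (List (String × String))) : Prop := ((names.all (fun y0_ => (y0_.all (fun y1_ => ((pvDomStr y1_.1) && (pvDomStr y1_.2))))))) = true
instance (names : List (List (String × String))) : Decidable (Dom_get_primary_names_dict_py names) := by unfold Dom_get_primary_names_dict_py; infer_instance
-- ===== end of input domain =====

-- B replaces A's fused early-return loop (with a backup accumulator) by two independent passes: first 'primary name', else last 'primary name variation' via find? over the reversed list; same behaviour, no speed claim.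


-- ===== PORT A =====
-- A's loop: return the first entry whose nametype lowercases to 'primary name';
-- meanwhile overwrite backup_name with each 'primary name variation' entry; skip empty/missing nametype.
-- After the loop, 'if backup_name' (truthy = nonempty dict) returns it; the final raise is excluded
-- by Pre_ (the port returns [] on both raise paths).
def loopA_gpn : List (List (String × String)) → Option (List (String × String)) → List (String × String)
  | [], backup =>
    match backup with
    | some b => if b = [] then [] else b
    | none => []
  | name :: rest, backup =>
    match name.lookup "nametype" with
    | none => loopA_gpn rest backup
    | some nt =>
      if nt = "" then loopA_gpn rest backup
      else if PySem.Str.lower nt = "primary name" then name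
      else if PySem.Str.lower nt = "primary name variation" then loopA_gpn rest (some name)
      else loopA_gpn rest backup

def get_primary_names_dict_py (names : List (List (String × String))) : List (String × String) :=
  loopA_gpn names none

-- ===== PORT B =====
-- (n.get("nametype") or "").lower() == target
def gpnMatches (target : String) (n : List (String × String)) : Bool :=
  PySem.Str.lower ((n.lookup "nametype").getD "") == target

def get_primary_names_dict_py_alt (names : List (List (String × String))) : List (String × String) :=
  match names.find? (gpnMatches "primary name") with
  | some n => n
  | none =>
    match names.reverse.find? (gpnMatches "primary name variation") with
    | some n => n
    | none => []  -- both programs raise Exception("Primary name not found") here; excluded by Pre_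

-- ===== PRECONDITION & SPEC =====
-- Pre_ excludes exactly the inputs on which A raises Exception("Primary name not found")
-- (no entry whose nametype lowercases to 'primary name' or 'primary name variation'); B raises there too.
def Pre_get_primary_names_dict_py (names : List (List (String × String))) : Prop :=
  (names.any fun n => gpnMatches "primary name" n || gpnMatches "primary name variation" n) = true
instance (names : List (List (String × String))) : Decidable (Pre_get_primary_names_dict_py names) := by unfold Pre_get_primary_names_dict_py; infer_instance

def pvWitness_get_primary_names_dict_py : (List (List (String × String))) :=
  [[("nametype", "Primary Name"), ("name", "ACME")]]

def Spec_get_primary_names_dict_py (names : List (List (String × String))) (out : List (String × String)) : Prop := out = get_primary_names_dict_py_alt names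
instance (names : List (List (String × String))) (out : List (String × String)) : Decidable (Spec_get_primary_names_dict_py names out) := by unfold Spec_get_primary_names_dict_py; infer_instance

-- ===== CLAIM (what is proved, stated in full; the proofs are below) =====
def Claim_equal_get_primary_names_dict_py : Prop := ∀ (names : List (List (String × String))), Dom_get_primary_names_dict_py names → Pre_get_primary_names_dict_py names → Spec_get_primary_names_dict_py names (get_primary_names_dict_py names)

-- ===== LEMMAS AND PROOFS =====

-- A's loop equals B's two-pass selection, for any value of the backup accumulator
theorem loopA_gpn_eq (names : List (List (String × String)))
    (backup : Option (List (String × String))) :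
    loopA_gpn names backup =
      match names.find? (gpnMatches "primary name") with
      | some n => n
      | none =>
        match names.reverse.find? (gpnMatches "primary name variation") with
        | some n => n
        | none =>
          match backup with
          | some b => if b = [] then [] else b
          | none => [] := by
  induction names generalizing backup with
  | nil => simp [loopA_gpn]
  | cons name rest ih =>
    simp only [List.reverse_cons, List.find?_append, List.find?_cons]
    cases hg : name.lookup "nametype" with
    | none =>
      have hP : gpnMatches "primary name" name = false := by simp [gpnMatches, hg]; decide
      have hV : gpnMatches "primary name variation" name = false := by
        simp [gpnMatches, hg]; decide
      simp only [loopA_gpn, hg, hP, hV, List.find?_nil, Option.or_none]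
      exact ih backup
    | some nt =>
      by_cases he : nt = ""
      · subst he
        have hP : gpnMatches "primary name" name = false := by simp [gpnMatches, hg]; decide
        have hV : gpnMatches "primary name variation" name = false := by
          simp [gpnMatches, hg]; decide
        simp only [loopA_gpn, hg, hP, hV, List.find?_nil, Option.or_none]
        exact ih backup
      · by_cases hp : PySem.Str.lower nt = "primary name"
        · have hP : gpnMatches "primary name" name = true := by simp [gpnMatches, hg, hp]
          simp only [loopA_gpn, hg, if_neg he, if_pos hp, hP]
        · by_cases hv : PySem.Str.lower nt = "primary name variation"
          · have hP : gpnMatches "primary name" name = false := by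
              simp [gpnMatches, hg]; exact hp
            have hV : gpnMatches "primary name variation" name = true := by
              simp [gpnMatches, hg, hv]
            have hne : name ≠ [] := by
              intro hn; subst hn; simp at hg
            simp only [loopA_gpn, hg, if_neg he, if_neg hp, if_pos hv, hP, hV]
            rw [ih (some name)]
            cases rest.find? (gpnMatches "primary name") with
            | some n => rfl
            | none =>
              cases rest.reverse.find? (gpnMatches "primary name variation") with
              | some n => rfl
              | none => simp [Option.or, if_neg hne]
          · have hP : gpnMatches "primary name" name = false := by
              simp [gpnMatches, hg]; exact hp
            have hV : gpnMatches "primary name variation" name = false := by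
              simp [gpnMatches, hg]; exact hv
            simp only [loopA_gpn, hg, if_neg he, if_neg hp, if_neg hv, hP, hV, List.find?_nil, Option.or_none]
            exact ih backup

-- ===== VERDICT (by name: the statement is the Claim_ definition above) =====
theorem get_primary_names_dict_py_spec : Claim_equal_get_primary_names_dict_py := by
  intro names _ _
  unfold Spec_get_primary_names_dict_py get_primary_names_dict_py get_primary_names_dict_py_alt
  rw [loopA_gpn_eq]
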